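-- pv_equiv track=rewrite | github.com/Tomas229/advent_of_code_2020 | day11/day11.py | equilibrium2
-- ===== SOURCE A (Python) =====
-- import copy
--
-- def get_adjacent_indices2(i, j, l):
--     adjacent_indices = []
--     len_x = len(l)
--     len_y = len(l[0])
--     x = i
--     y = j
--     while(x + 1 < len_x):
--         x += 1
--         if(l[x][y] != "."):
--             adjacent_indices.append((x, y))
--             break
--     x = i
--     y = j
--     while x > 0:
--         x -= 1
--         if(l[x][y] != "."):
--             adjacent_indices.append((x, y))
--             break
--     x = i
--     y = j
--     while(y + 1 < len_y):
--         y += 1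
--         if(l[x][y] != "."):
--             adjacent_indices.append((x, y))
--             break
--     x = i
--     y = j
--     while y > 0:
--         y -= 1
--         if(l[x][y] != "."):
--             adjacent_indices.append((x, y))
--             break
--     x = i
--     y = j
--     while(x + 1 < len_x and y + 1 < len_y):
--         x += 1
--         y += 1
--         if(l[x][y] != "."):
--             adjacent_indices.append((x, y))
--             break
--     x = i
--     y = j
--     while(x + 1 < len_x and y > 0):
--         x += 1
--         y -= 1
--         if(l[x][y] != "."):
--             adjacent_indices.append((x, y))
--             break
--     x = i
--     y = j
--     while(x > 0 and y > 0):
--         x -= 1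
--         y -= 1
--         if(l[x][y] != "."):
--             adjacent_indices.append((x, y))
--             break
--     x = i
--     y = j
--     while(x > 0 and y + 1 < len_y):
--         x -= 1
--         y += 1
--         if(l[x][y] != "."):
--             adjacent_indices.append((x, y))
--             break
--
--     return adjacent_indices
--
-- def equilibrium2(l):
--     x = len(l)
--     y = len(l[0])
--     new = copy.deepcopy(l)
--     while True:
--         l = copy.deepcopy(new)
--         for i in range(x):
--             for j in range(y):
--                 adj = get_adjacent_indices2(i, j, l)
--                 hash_count = 0
--                 for a in adj:
--                     if l[a[0]][a[1]] == "#":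
--                         hash_count += 1
--                 if l[i][j] == "L" and hash_count == 0:
--                     new[i][j] = "#"
--                 if l[i][j] == "#" and hash_count > 4:
--                     new[i][j] = "L"
--         if(new == l):
--             break
--     count = 0
--     for i in range(x):
--         for j in range(y):
--             if l[i][j] == "#":
--                 count += 1
--     return count
-- ===== SOURCE B (Python) =====
-- def equilibrium2(l):
--     rows, cols = len(l), len(l[0])
--     dirs = [(1, 0), (-1, 0), (0, 1), (0, -1), (1, 1), (1, -1), (-1, -1), (-1, 1)]
--
--     def first_seat(i, j, dx, dy):
--         x, y = i + dx, j + dy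
--         while 0 <= x < rows and 0 <= y < cols:
--             if l[x][y] != ".":
--                 return [(x, y)]
--             x += dx
--             y += dy
--         return []
--
--     # static line-of-sight adjacency table, built once ('.' cells never change)
--     table = [[[p for d in dirs for p in first_seat(i, j, d[0], d[1])]
--               for j in range(cols)] for i in range(rows)]
--     grid = [row[:cols] for row in l]
--     while True:
--         nxt = [[("#" if c == "L" and occ == 0 else "L" if c == "#" and occ > 4 else c)
--                 for j in range(cols)
--                 for c, occ in [(grid[i][j],
--                                 sum(grid[x][y] == "#" for x, y in table[i][j]))]]
--                for i in range(rows)]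
--         if nxt == grid:
--             return sum(row.count("#") for row in grid)
--         grid = nxt
-- ===== Notes on version B (the rewrite author's own statement) =====
-- stated objective: faster
-- what changed: B precomputes a static line-of-sight adjacency table once (floors never change, so visibility is fixed) and each round only counts occupied neighbours through that table with a single comprehension pass, instead of A re-walking all eight rays from every cell in every round.
import Mathlib
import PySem

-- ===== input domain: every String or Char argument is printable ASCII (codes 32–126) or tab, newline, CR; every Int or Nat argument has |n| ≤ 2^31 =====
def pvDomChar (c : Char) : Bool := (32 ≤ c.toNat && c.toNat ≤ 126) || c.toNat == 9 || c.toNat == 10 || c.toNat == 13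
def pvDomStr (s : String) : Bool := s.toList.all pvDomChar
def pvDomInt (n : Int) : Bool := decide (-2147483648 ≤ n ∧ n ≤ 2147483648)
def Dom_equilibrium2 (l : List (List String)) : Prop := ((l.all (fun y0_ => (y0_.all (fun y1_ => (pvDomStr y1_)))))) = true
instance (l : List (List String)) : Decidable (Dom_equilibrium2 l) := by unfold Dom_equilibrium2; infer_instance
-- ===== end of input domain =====

-- B replaces A's per-round line-of-sight ray walks by a static adjacency table built once
-- (floors never change), then iterates the automaton over that table; return value only.

-- ===== PORT A =====
def pvCell (l : List (List String)) (x y : Nat) : String := (l.getD x []).getD y ""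

-- while(x + 1 < len_x): x += 1; test
def rayDown (g : List (List String)) (lenx : Nat) (x y : Nat) : List (Nat × Nat) :=
  if h : x + 1 < lenx then
    if pvCell g (x+1) y != "." then [(x+1, y)] else rayDown g lenx (x+1) y
  else []
termination_by lenx - x
decreasing_by omega

-- while x > 0: x -= 1; test
def rayUp (g : List (List String)) (x y : Nat) : List (Nat × Nat) :=
  match x with
  | 0 => []
  | x' + 1 => if pvCell g x' y != "." then [(x', y)] else rayUp g x' y

-- while(y + 1 < len_y): y += 1; test
def rayRight (g : List (List String)) (leny : Nat) (x y : Nat) : List (Nat × Nat) :=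
  if h : y + 1 < leny then
    if pvCell g x (y+1) != "." then [(x, y+1)] else rayRight g leny x (y+1)
  else []
termination_by leny - y
decreasing_by omega

-- while y > 0: y -= 1; test
def rayLeft (g : List (List String)) (x y : Nat) : List (Nat × Nat) :=
  match y with
  | 0 => []
  | y' + 1 => if pvCell g x y' != "." then [(x, y')] else rayLeft g x y'

-- while(x + 1 < len_x and y + 1 < len_y): x += 1; y += 1; test
def rayDR (g : List (List String)) (lenx leny : Nat) (x y : Nat) : List (Nat × Nat) :=
  if h : x + 1 < lenx ∧ y + 1 < leny then
    if pvCell g (x+1) (y+1) != "." then [(x+1, y+1)] else rayDR g lenx leny (x+1) (y+1)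
  else []
termination_by lenx - x
decreasing_by omega

-- while(x + 1 < len_x and y > 0): x += 1; y -= 1; test
def rayDL (g : List (List String)) (lenx : Nat) (x y : Nat) : List (Nat × Nat) :=
  match y with
  | 0 => []
  | y' + 1 =>
    if x + 1 < lenx then
      if pvCell g (x+1) y' != "." then [(x+1, y')] else rayDL g lenx (x+1) y'
    else []

-- while(x > 0 and y > 0): x -= 1; y -= 1; test
def rayUL (g : List (List String)) (x y : Nat) : List (Nat × Nat) :=
  match x with
  | 0 => []
  | x' + 1 =>
    match y with
    | 0 => []
    | y' + 1 => if pvCell g x' y' != "." then [(x', y')] else rayUL g x' y'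

-- while(x > 0 and y + 1 < len_y): x -= 1; y += 1; test
def rayUR (g : List (List String)) (leny : Nat) (x y : Nat) : List (Nat × Nat) :=
  match x with
  | 0 => []
  | x' + 1 =>
    if y + 1 < leny then
      if pvCell g x' (y+1) != "." then [(x', y+1)] else rayUR g leny x' (y+1)
    else []

def getAdj (i j : Nat) (g : List (List String)) : List (Nat × Nat) :=
  let lenx := g.length
  let leny := (g.getD 0 []).length
  rayDown g lenx i j ++ rayUp g i j ++ rayRight g leny i j ++ rayLeft g i j ++
    rayDR g lenx leny i j ++ rayDL g lenx i j ++ rayUL g i j ++ rayUR g leny i j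

def newA (g : List (List String)) (i j : Nat) : String :=
  let adj := getAdj i j g
  let hc := adj.countP (fun a => pvCell g a.1 a.2 == "#")
  let c := pvCell g i j
  if c == "L" && hc == 0 then "#"
  else if c == "#" && decide (4 < hc) then "L"
  else c

def stepA (y : Nat) (g : List (List String)) : List (List String) :=
  g.mapIdx (fun i row => row.mapIdx (fun j s => if j < y then newA g i j else s))

-- while True loop; the fuel is a totality guard only (see equilibrium2)
def loopA (y : Nat) : Nat → List (List String) → List (List String)
  | 0, new => new
  | f + 1, new =>
    let n2 := stepA y new
    if n2 == new then new else loopA y f n2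

def equilibrium2 (l : List (List String)) : Int :=
  let x := l.length
  let y := (l.getD 0 []).length
  -- the trajectory visits pairwise-distinct states until its first fixpoint, and at most
  -- 2^(x*y) states exist, so this fuel never runs out when the Python terminates
  let fin := loopA y (2 ^ (x * y) + 1) l
  (((List.range x).map
      (fun i => ((List.range y).filter (fun j => pvCell fin i j == "#")).length)).sum : Nat)

-- ===== PORT B =====
-- while 0 <= x < rows and 0 <= y < cols: test; step — fuel rows+cols is a totality guard
def walkB (l : List (List String)) (rows cols : Nat) (dx dy : Int) :
    Nat → Int → Int → List (Nat × Nat)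
  | 0, _, _ => []
  | f + 1, x, y =>
    if 0 ≤ x ∧ x < (rows : Int) ∧ 0 ≤ y ∧ y < (cols : Int) then
      if pvCell l x.toNat y.toNat != "." then [(x.toNat, y.toNat)]
      else walkB l rows cols dx dy f (x + dx) (y + dy)
    else []

def pvDirs : List (Int × Int) := [(1,0), (-1,0), (0,1), (0,-1), (1,1), (1,-1), (-1,-1), (-1,1)]

def visB (l : List (List String)) (rows cols i j : Nat) : List (Nat × Nat) :=
  pvDirs.flatMap (fun d => walkB l rows cols d.1 d.2 (rows + cols) ((i : Int) + d.1) ((j : Int) + d.2))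

def tableB (l : List (List String)) (rows cols : Nat) : List (List (List (Nat × Nat))) :=
  (List.range rows).map (fun i => (List.range cols).map (fun j => visB l rows cols i j))

def stepB (tbl : List (List (List (Nat × Nat)))) (rows cols : Nat)
    (g : List (List String)) : List (List String) :=
  (List.range rows).map (fun i => (List.range cols).map (fun j =>
    let c := pvCell g i j
    let occ := ((tbl.getD i []).getD j []).countP (fun p => pvCell g p.1 p.2 == "#")
    if c == "L" && occ == 0 then "#"
    else if c == "#" && decide (4 < occ) then "L"
    else c))

-- while True loop; same totality-guard fuel as A's port
def loopB (tbl : List (List (List (Nat × Nat)))) (rows cols : Nat) :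
    Nat → List (List String) → Int
  | 0, g => ((g.map (fun row => row.count "#")).sum : Nat)
  | f + 1, g =>
    let nxt := stepB tbl rows cols g
    if nxt == g then ((g.map (fun row => row.count "#")).sum : Nat)
    else loopB tbl rows cols f nxt

def equilibrium2_alt (l : List (List String)) : Int :=
  let rows := l.length
  let cols := (l.getD 0 []).length
  let tbl := tableB l rows cols
  loopB tbl rows cols (2 ^ (rows * cols) + 1) (l.map (fun r => r.take cols))

-- ===== PRECONDITION & SPEC =====
-- Pre_ excludes exactly the inputs on which Python A raises IndexError: the empty grid
-- (len(l[0])) and grids with a row shorter than the first row (l[x][y] during a ray walk).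
def Pre_equilibrium2 (l : List (List String)) : Prop :=
  l ≠ [] ∧ ∀ row ∈ l, (l.getD 0 []).length ≤ row.length
instance (l : List (List String)) : Decidable (Pre_equilibrium2 l) := by
  unfold Pre_equilibrium2; infer_instance

def pvWitness_equilibrium2 : List (List String) := [["L", "."], ["#", "L"]]

def Spec_equilibrium2 (l : List (List String)) (out : Int) : Prop := out = equilibrium2_alt l
instance (l : List (List String)) (out : Int) : Decidable (Spec_equilibrium2 l out) := by
  unfold Spec_equilibrium2; infer_instance

-- ===== CLAIM (what is proved, stated in full; the proofs are below) =====
def Claim_equal_equilibrium2 : Prop :=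
  ∀ (l : List (List String)), Dom_equilibrium2 l → Pre_equilibrium2 l →
    Spec_equilibrium2 l (equilibrium2 l)

-- ===== LEMMAS AND PROOFS =====

-- shape: g has exactly the row/column layout of l0
def pvSh (l0 g : List (List String)) : Prop :=
  g.length = l0.length ∧ ∀ k, (g.getD k []).length = (l0.getD k []).length

-- mask: g has floor ('.') exactly where l0 has floor, inside the counted rectangle
def pvMsk (l0 g : List (List String)) : Prop :=
  ∀ a b, a < l0.length → b < (l0.getD 0 []).length →
    (pvCell g a b == ".") = (pvCell l0 a b == ".")

theorem pvCell_map_take (g : List (List String)) (cols a b : Nat) (hb : b < cols) :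
    pvCell (g.map (fun r => r.take cols)) a b = pvCell g a b := by
  simp only [pvCell, List.getD_eq_getElem?_getD, List.getElem?_map]
  cases h : g[a]? with
  | none => simp
  | some row => simp [List.getElem?_take_of_lt hb]

theorem getD_range_map {α : Type} (n i : Nat) (f : Nat → α) (d : α) (h : i < n) :
    ((List.range n).map f).getD i d = f i := by
  simp [List.getD_eq_getElem?_getD, h]

theorem walkB_mem (l : List (List String)) (rows cols : Nat) (dx dy : Int) :
    ∀ (f : Nat) (x y : Int) (p : Nat × Nat),
      p ∈ walkB l rows cols dx dy f x y → p.1 < rows ∧ p.2 < cols := by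
  intro f
  induction f with
  | zero => intro x y p hp; simp [walkB] at hp
  | succ f ih =>
    intro x y p hp
    rw [walkB] at hp
    by_cases hc : (0 ≤ x ∧ x < (rows : Int) ∧ 0 ≤ y ∧ y < (cols : Int))
    · rw [if_pos hc] at hp
      by_cases ht : pvCell l x.toNat y.toNat != "."
      · rw [if_pos ht] at hp
        simp at hp
        subst hp
        constructor <;> [skip; skip] <;> omega
      · rw [if_neg ht] at hp
        exact ih _ _ _ hp
    · rw [if_neg hc] at hp; simp at hp

theorem walk_eq_rayDown (l0 g : List (List String)) (rows cols : Nat)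
    (hmask : ∀ a b, a < rows → b < cols → (pvCell g a b == ".") = (pvCell l0 a b == ".")) :
    ∀ (f x y : Nat), x < rows → y < cols → rows ≤ x + 1 + f →
      walkB l0 rows cols 1 0 (f+1) (↑(x+1)) (↑y) = rayDown g rows x y := by
  intro f
  induction f with
  | zero =>
    intro x y hx hy hb
    rw [walkB, rayDown]
    have h1 : ¬ ((0:Int) ≤ ↑(x+1) ∧ (↑(x+1):Int) < ↑rows ∧ 0 ≤ (↑y:Int) ∧ (↑y:Int) < ↑cols) := by
      push_cast; omega
    have h2 : ¬ (x + 1 < rows) := by omega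
    rw [if_neg h1, dif_neg h2]
  | succ f ih =>
    intro x y hx hy hb
    rw [walkB, rayDown]
    by_cases hxr : x + 1 < rows
    · have hc : ((0:Int) ≤ ↑(x+1) ∧ (↑(x+1):Int) < ↑rows ∧ 0 ≤ (↑y:Int) ∧ (↑y:Int) < ↑cols) := by
        push_cast; omega
      rw [if_pos hc, dif_pos hxr]
      have htn : ((↑(x+1):Int)).toNat = x + 1 := by omega
      have hyn : ((↑y:Int)).toNat = y := by omega
      rw [htn, hyn]
      have hcell : (pvCell l0 (x+1) y != ".") = (pvCell g (x+1) y != ".") := by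
        simp only [bne, hmask (x+1) y hxr hy]
      rw [hcell]
      by_cases ht : pvCell g (x+1) y != "."
      · rw [if_pos ht, if_pos ht]
      · rw [if_neg ht, if_neg ht]
        have e1 : ((↑(x+1):Int) + 1) = (↑(x+1+1):Int) := by push_cast; ring
        have e2 : ((↑y:Int) + 0) = (↑y:Int) := by ring
        rw [e1, e2]
        exact ih (x+1) y hxr hy (by omega)
    · have h1 : ¬ ((0:Int) ≤ ↑(x+1) ∧ (↑(x+1):Int) < ↑rows ∧ 0 ≤ (↑y:Int) ∧ (↑y:Int) < ↑cols) := by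
        push_cast; omega
      rw [if_neg h1, dif_neg hxr]

theorem walk_eq_rayUp (l0 g : List (List String)) (rows cols : Nat)
    (hmask : ∀ a b, a < rows → b < cols → (pvCell g a b == ".") = (pvCell l0 a b == ".")) :
    ∀ (f x y : Nat), x < rows → y < cols → x ≤ f →
      walkB l0 rows cols (-1) 0 (f+1) ((↑x:Int) - 1) (↑y) = rayUp g x y := by
  intro f
  induction f with
  | zero =>
    intro x y hx hy hb
    interval_cases x
    rw [walkB, rayUp]
    norm_num
  | succ f ih =>
    intro x y hx hy hb
    match x with
    | 0 =>
      rw [walkB, rayUp]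
      norm_num
    | x' + 1 =>
      rw [walkB, rayUp]
      have hc : ((0:Int) ≤ ↑(x'+1) - 1 ∧ (↑(x'+1):Int) - 1 < ↑rows ∧ 0 ≤ (↑y:Int) ∧ (↑y:Int) < ↑cols) := by
        push_cast; omega
      rw [if_pos hc]
      have htn : ((↑(x'+1):Int) - 1).toNat = x' := by omega
      have hyn : ((↑y:Int)).toNat = y := by omega
      rw [htn, hyn]
      have hcell : (pvCell l0 x' y != ".") = (pvCell g x' y != ".") := by
        simp only [bne, hmask x' y (by omega) hy]
      rw [hcell]
      by_cases ht : pvCell g x' y != "."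
      · rw [if_pos ht, if_pos ht]
      · rw [if_neg ht, if_neg ht]
        have e1 : ((↑(x'+1):Int) - 1 + -1) = (↑x':Int) - 1 := by push_cast; ring
        have e2 : ((↑y:Int) + 0) = (↑y:Int) := by ring
        rw [e1, e2]
        exact ih x' y (by omega) hy (by omega)

theorem walk_eq_rayRight (l0 g : List (List String)) (rows cols : Nat)
    (hmask : ∀ a b, a < rows → b < cols → (pvCell g a b == ".") = (pvCell l0 a b == ".")) :
    ∀ (f x y : Nat), x < rows → y < cols → cols ≤ y + 1 + f →
      walkB l0 rows cols 0 1 (f+1) (↑x) (↑(y+1)) = rayRight g cols x y := by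
  intro f
  induction f with
  | zero =>
    intro x y hx hy hb
    rw [walkB, rayRight]
    have h1 : ¬ ((0:Int) ≤ ↑x ∧ (↑x:Int) < ↑rows ∧ 0 ≤ (↑(y+1):Int) ∧ (↑(y+1):Int) < ↑cols) := by
      push_cast; omega
    have h2 : ¬ (y + 1 < cols) := by omega
    rw [if_neg h1, dif_neg h2]
  | succ f ih =>
    intro x y hx hy hb
    rw [walkB, rayRight]
    by_cases hyr : y + 1 < cols
    · have hc : ((0:Int) ≤ ↑x ∧ (↑x:Int) < ↑rows ∧ 0 ≤ (↑(y+1):Int) ∧ (↑(y+1):Int) < ↑cols) := by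
        push_cast; omega
      rw [if_pos hc, dif_pos hyr]
      have htn : ((↑x:Int)).toNat = x := by omega
      have hyn : ((↑(y+1):Int)).toNat = y + 1 := by omega
      rw [htn, hyn]
      have hcell : (pvCell l0 x (y+1) != ".") = (pvCell g x (y+1) != ".") := by
        simp only [bne, hmask x (y+1) hx hyr]
      rw [hcell]
      by_cases ht : pvCell g x (y+1) != "."
      · rw [if_pos ht, if_pos ht]
      · rw [if_neg ht, if_neg ht]
        have e1 : ((↑x:Int) + 0) = (↑x:Int) := by ring
        have e2 : ((↑(y+1):Int) + 1) = (↑(y+1+1):Int) := by push_cast; ring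
        rw [e1, e2]
        exact ih x (y+1) hx hyr (by omega)
    · have h1 : ¬ ((0:Int) ≤ ↑x ∧ (↑x:Int) < ↑rows ∧ 0 ≤ (↑(y+1):Int) ∧ (↑(y+1):Int) < ↑cols) := by
        push_cast; omega
      rw [if_neg h1, dif_neg hyr]

theorem walk_eq_rayLeft (l0 g : List (List String)) (rows cols : Nat)
    (hmask : ∀ a b, a < rows → b < cols → (pvCell g a b == ".") = (pvCell l0 a b == ".")) :
    ∀ (f x y : Nat), x < rows → y < cols → y ≤ f →
      walkB l0 rows cols 0 (-1) (f+1) (↑x) ((↑y:Int) - 1) = rayLeft g x y := by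
  intro f
  induction f with
  | zero =>
    intro x y hx hy hb
    interval_cases y
    rw [walkB, rayLeft]
    norm_num
  | succ f ih =>
    intro x y hx hy hb
    match y with
    | 0 =>
      rw [walkB, rayLeft]
      norm_num
    | y' + 1 =>
      rw [walkB, rayLeft]
      have hc : ((0:Int) ≤ ↑x ∧ (↑x:Int) < ↑rows ∧ 0 ≤ (↑(y'+1):Int) - 1 ∧ (↑(y'+1):Int) - 1 < ↑cols) := by
        push_cast; omega
      rw [if_pos hc]
      have htn : ((↑x:Int)).toNat = x := by omega
      have hyn : ((↑(y'+1):Int) - 1).toNat = y' := by omega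
      rw [htn, hyn]
      have hcell : (pvCell l0 x y' != ".") = (pvCell g x y' != ".") := by
        simp only [bne, hmask x y' hx (by omega)]
      rw [hcell]
      by_cases ht : pvCell g x y' != "."
      · rw [if_pos ht, if_pos ht]
      · rw [if_neg ht, if_neg ht]
        have e1 : ((↑x:Int) + 0) = (↑x:Int) := by ring
        have e2 : ((↑(y'+1):Int) - 1 + -1) = (↑y':Int) - 1 := by push_cast; ring
        rw [e1, e2]
        exact ih x y' hx (by omega) (by omega)

theorem walk_eq_rayDR (l0 g : List (List String)) (rows cols : Nat)
    (hmask : ∀ a b, a < rows → b < cols → (pvCell g a b == ".") = (pvCell l0 a b == ".")) :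
    ∀ (f x y : Nat), x < rows → y < cols → rows ≤ x + 1 + f →
      walkB l0 rows cols 1 1 (f+1) (↑(x+1)) (↑(y+1)) = rayDR g rows cols x y := by
  intro f
  induction f with
  | zero =>
    intro x y hx hy hb
    rw [walkB, rayDR]
    have h1 : ¬ ((0:Int) ≤ ↑(x+1) ∧ (↑(x+1):Int) < ↑rows ∧ 0 ≤ (↑(y+1):Int) ∧ (↑(y+1):Int) < ↑cols) := by
      push_cast; omega
    have h2 : ¬ (x + 1 < rows ∧ y + 1 < cols) := by omega
    rw [if_neg h1, dif_neg h2]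
  | succ f ih =>
    intro x y hx hy hb
    rw [walkB, rayDR]
    by_cases hxy : x + 1 < rows ∧ y + 1 < cols
    · have hc : ((0:Int) ≤ ↑(x+1) ∧ (↑(x+1):Int) < ↑rows ∧ 0 ≤ (↑(y+1):Int) ∧ (↑(y+1):Int) < ↑cols) := by
        push_cast; omega
      rw [if_pos hc, dif_pos hxy]
      have htn : ((↑(x+1):Int)).toNat = x + 1 := by omega
      have hyn : ((↑(y+1):Int)).toNat = y + 1 := by omega
      rw [htn, hyn]
      have hcell : (pvCell l0 (x+1) (y+1) != ".") = (pvCell g (x+1) (y+1) != ".") := by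
        simp only [bne, hmask (x+1) (y+1) hxy.1 hxy.2]
      rw [hcell]
      by_cases ht : pvCell g (x+1) (y+1) != "."
      · rw [if_pos ht, if_pos ht]
      · rw [if_neg ht, if_neg ht]
        have e1 : ((↑(x+1):Int) + 1) = (↑(x+1+1):Int) := by push_cast; ring
        have e2 : ((↑(y+1):Int) + 1) = (↑(y+1+1):Int) := by push_cast; ring
        rw [e1, e2]
        exact ih (x+1) (y+1) hxy.1 hxy.2 (by omega)
    · have h1 : ¬ ((0:Int) ≤ ↑(x+1) ∧ (↑(x+1):Int) < ↑rows ∧ 0 ≤ (↑(y+1):Int) ∧ (↑(y+1):Int) < ↑cols) := by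
        push_cast; omega
      rw [if_neg h1, dif_neg hxy]

theorem walk_eq_rayDL (l0 g : List (List String)) (rows cols : Nat)
    (hmask : ∀ a b, a < rows → b < cols → (pvCell g a b == ".") = (pvCell l0 a b == ".")) :
    ∀ (f x y : Nat), x < rows → y < cols → y ≤ f →
      walkB l0 rows cols 1 (-1) (f+1) (↑(x+1)) ((↑y:Int) - 1) = rayDL g rows x y := by
  intro f
  induction f with
  | zero =>
    intro x y hx hy hb
    interval_cases y
    rw [walkB, rayDL]
    norm_num
  | succ f ih =>
    intro x y hx hy hb
    match y with
    | 0 =>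
      rw [walkB, rayDL]
      norm_num
    | y' + 1 =>
      rw [walkB, rayDL]
      by_cases hxr : x + 1 < rows
      · have hc : ((0:Int) ≤ ↑(x+1) ∧ (↑(x+1):Int) < ↑rows ∧ 0 ≤ (↑(y'+1):Int) - 1 ∧ (↑(y'+1):Int) - 1 < ↑cols) := by
          push_cast; omega
        rw [if_pos hc, if_pos hxr]
        have htn : ((↑(x+1):Int)).toNat = x + 1 := by omega
        have hyn : ((↑(y'+1):Int) - 1).toNat = y' := by omega
        rw [htn, hyn]
        have hcell : (pvCell l0 (x+1) y' != ".") = (pvCell g (x+1) y' != ".") := by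
          simp only [bne, hmask (x+1) y' hxr (by omega)]
        rw [hcell]
        by_cases ht : pvCell g (x+1) y' != "."
        · rw [if_pos ht, if_pos ht]
        · rw [if_neg ht, if_neg ht]
          have e1 : ((↑(x+1):Int) + 1) = (↑(x+1+1):Int) := by push_cast; ring
          have e2 : ((↑(y'+1):Int) - 1 + -1) = (↑y':Int) - 1 := by push_cast; ring
          rw [e1, e2]
          exact ih (x+1) y' hxr (by omega) (by omega)
      · have h1 : ¬ ((0:Int) ≤ ↑(x+1) ∧ (↑(x+1):Int) < ↑rows ∧ 0 ≤ (↑(y'+1):Int) - 1 ∧ (↑(y'+1):Int) - 1 < ↑cols) := by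
          push_cast; omega
        rw [if_neg h1, if_neg hxr]

theorem walk_eq_rayUL (l0 g : List (List String)) (rows cols : Nat)
    (hmask : ∀ a b, a < rows → b < cols → (pvCell g a b == ".") = (pvCell l0 a b == ".")) :
    ∀ (f x y : Nat), x < rows → y < cols → x ≤ f →
      walkB l0 rows cols (-1) (-1) (f+1) ((↑x:Int) - 1) ((↑y:Int) - 1) = rayUL g x y := by
  intro f
  induction f with
  | zero =>
    intro x y hx hy hb
    interval_cases x
    rw [walkB, rayUL]
    norm_num
  | succ f ih =>
    intro x y hx hy hb
    match x with
    | 0 =>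
      rw [walkB, rayUL]
      norm_num
    | x' + 1 =>
      match y with
      | 0 =>
        rw [walkB, rayUL]
        have h1 : ¬ ((0:Int) ≤ ↑(x'+1) - 1 ∧ (↑(x'+1):Int) - 1 < ↑rows ∧ 0 ≤ ((0:Nat):Int) - 1 ∧ ((0:Nat):Int) - 1 < ↑cols) := by
          intro h
          omega
        rw [if_neg h1]
      | y' + 1 =>
        rw [walkB, rayUL]
        have hc : ((0:Int) ≤ ↑(x'+1) - 1 ∧ (↑(x'+1):Int) - 1 < ↑rows ∧ 0 ≤ (↑(y'+1):Int) - 1 ∧ (↑(y'+1):Int) - 1 < ↑cols) := by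
          push_cast; omega
        rw [if_pos hc]
        have htn : ((↑(x'+1):Int) - 1).toNat = x' := by omega
        have hyn : ((↑(y'+1):Int) - 1).toNat = y' := by omega
        rw [htn, hyn]
        have hcell : (pvCell l0 x' y' != ".") = (pvCell g x' y' != ".") := by
          simp only [bne, hmask x' y' (by omega) (by omega)]
        rw [hcell]
        by_cases ht : pvCell g x' y' != "."
        · rw [if_pos ht, if_pos ht]
        · rw [if_neg ht, if_neg ht]
          have e1 : ((↑(x'+1):Int) - 1 + -1) = (↑x':Int) - 1 := by push_cast; ring
          have e2 : ((↑(y'+1):Int) - 1 + -1) = (↑y':Int) - 1 := by push_cast; ring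
          rw [e1, e2]
          exact ih x' y' (by omega) (by omega) (by omega)

theorem walk_eq_rayUR (l0 g : List (List String)) (rows cols : Nat)
    (hmask : ∀ a b, a < rows → b < cols → (pvCell g a b == ".") = (pvCell l0 a b == ".")) :
    ∀ (f x y : Nat), x < rows → y < cols → x ≤ f →
      walkB l0 rows cols (-1) 1 (f+1) ((↑x:Int) - 1) (↑(y+1)) = rayUR g cols x y := by
  intro f
  induction f with
  | zero =>
    intro x y hx hy hb
    interval_cases x
    rw [walkB, rayUR]
    norm_num
  | succ f ih =>
    intro x y hx hy hb
    match x with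
    | 0 =>
      rw [walkB, rayUR]
      norm_num
    | x' + 1 =>
      rw [walkB, rayUR]
      by_cases hyr : y + 1 < cols
      · have hc : ((0:Int) ≤ ↑(x'+1) - 1 ∧ (↑(x'+1):Int) - 1 < ↑rows ∧ 0 ≤ (↑(y+1):Int) ∧ (↑(y+1):Int) < ↑cols) := by
          push_cast; omega
        rw [if_pos hc, if_pos hyr]
        have htn : ((↑(x'+1):Int) - 1).toNat = x' := by omega
        have hyn : ((↑(y+1):Int)).toNat = y + 1 := by omega
        rw [htn, hyn]
        have hcell : (pvCell l0 x' (y+1) != ".") = (pvCell g x' (y+1) != ".") := by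
          simp only [bne, hmask x' (y+1) (by omega) hyr]
        rw [hcell]
        by_cases ht : pvCell g x' (y+1) != "."
        · rw [if_pos ht, if_pos ht]
        · rw [if_neg ht, if_neg ht]
          have e1 : ((↑(x'+1):Int) - 1 + -1) = (↑x':Int) - 1 := by push_cast; ring
          have e2 : ((↑(y+1):Int) + 1) = (↑(y+1+1):Int) := by push_cast; ring
          rw [e1, e2]
          exact ih x' (y+1) (by omega) hyr (by omega)
      · have h1 : ¬ ((0:Int) ≤ ↑(x'+1) - 1 ∧ (↑(x'+1):Int) - 1 < ↑rows ∧ 0 ≤ (↑(y+1):Int) ∧ (↑(y+1):Int) < ↑cols) := by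
          push_cast; omega
        rw [if_neg h1, if_neg hyr]

theorem countP_congr_mem {α : Type} (l : List α) (p q : α → Bool)
    (h : ∀ a ∈ l, p a = q a) : l.countP p = l.countP q := by
  induction l with
  | nil => rfl
  | cons a t ih => simp [List.countP_cons, h a (by simp), ih (fun b hb => h b (by simp [hb]))]

theorem pvCell_eq_getElem (g : List (List String)) (i j : Nat)
    (hi : i < g.length) (hj : j < (g[i]).length) : pvCell g i j = g[i][j] := by
  simp only [pvCell, List.getD_eq_getElem _ _ hi, List.getD_eq_getElem _ _ hj]

theorem getAdj_eq_visB (l0 g : List (List String)) (i j : Nat)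
    (hlen : g.length = l0.length)
    (hrow0 : (g.getD 0 []).length = (l0.getD 0 []).length)
    (hmask : pvMsk l0 g)
    (hi : i < l0.length) (hj : j < (l0.getD 0 []).length) :
    getAdj i j g = visB l0 l0.length ((l0.getD 0 []).length) i j := by
  have hcols : 0 < (l0.getD 0 []).length := by omega
  obtain ⟨f, hf⟩ : ∃ f, l0.length + (l0.getD 0 []).length = f + 1 :=
    ⟨l0.length + (l0.getD 0 []).length - 1, by omega⟩
  simp only [getAdj, visB, pvDirs, List.flatMap_cons, List.flatMap_nil, List.append_nil, hlen, hrow0]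
  rw [hf]
  have e1 : ((i:Int) + 1) = ((i+1 : Nat) : Int) := by push_cast; ring
  have e2 : ((j:Int) + 1) = ((j+1 : Nat) : Int) := by push_cast; ring
  have e3 : ((i:Int) + -1) = (i:Int) - 1 := by ring
  have e4 : ((j:Int) + -1) = (j:Int) - 1 := by ring
  have e5 : ((i:Int) + 0) = (i:Int) := by ring
  have e6 : ((j:Int) + 0) = (j:Int) := by ring
  rw [e1, e2, e3, e4, e5, e6]
  rw [walk_eq_rayDown l0 g _ _ hmask f i j hi hj (by omega),
      walk_eq_rayUp l0 g _ _ hmask f i j hi hj (by omega),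
      walk_eq_rayRight l0 g _ _ hmask f i j hi hj (by omega),
      walk_eq_rayLeft l0 g _ _ hmask f i j hi hj (by omega),
      walk_eq_rayDR l0 g _ _ hmask f i j hi hj (by omega),
      walk_eq_rayDL l0 g _ _ hmask f i j hi hj (by omega),
      walk_eq_rayUL l0 g _ _ hmask f i j hi hj (by omega),
      walk_eq_rayUR l0 g _ _ hmask f i j hi hj (by omega)]
  simp [List.append_assoc]

theorem getAdj_mem_bounds (l0 g : List (List String)) (i j : Nat)
    (hlen : g.length = l0.length)
    (hrow0 : (g.getD 0 []).length = (l0.getD 0 []).length)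
    (hmask : pvMsk l0 g)
    (hi : i < l0.length) (hj : j < (l0.getD 0 []).length) :
    ∀ p ∈ getAdj i j g, p.1 < l0.length ∧ p.2 < (l0.getD 0 []).length := by
  intro p hp
  rw [getAdj_eq_visB l0 g i j hlen hrow0 hmask hi hj] at hp
  simp only [visB, List.mem_flatMap] at hp
  obtain ⟨d, _, hw⟩ := hp
  exact walkB_mem l0 _ _ d.1 d.2 _ _ _ p hw

theorem stepA_length (y : Nat) (g : List (List String)) : (stepA y g).length = g.length := by
  simp [stepA]

theorem stepA_getElem (y : Nat) (g : List (List String)) (i : Nat) (hi : i < g.length) :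
    (stepA y g)[i]'(by simpa [stepA_length]) =
      (g[i]).mapIdx (fun j s => if j < y then newA g i j else s) := by
  simp [stepA]

theorem stepA_getD_len (y : Nat) (g : List (List String)) (k : Nat) :
    ((stepA y g).getD k []).length = ((g.getD k []).length) := by
  by_cases hk : k < g.length
  · rw [List.getD_eq_getElem _ _ (by simpa [stepA_length]), List.getD_eq_getElem _ _ hk,
      stepA_getElem y g k hk]
    simp
  · rw [List.getD_eq_default _ _ (by simpa [stepA_length] using Nat.le_of_not_lt hk),
      List.getD_eq_default _ _ (Nat.le_of_not_lt hk)]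

theorem pvCell_stepA (cols : Nat) (g : List (List String)) (i j : Nat)
    (hi : i < g.length) (hj : j < (g.getD i []).length) :
    pvCell (stepA cols g) i j = if j < cols then newA g i j else pvCell g i j := by
  have hj' : j < (g[i]).length := by rwa [List.getD_eq_getElem _ _ hi] at hj
  have h1 : i < (stepA cols g).length := by simpa [stepA_length]
  have h2 : j < ((stepA cols g)[i]'h1).length := by
    rw [stepA_getElem cols g i hi]; simpa
  rw [pvCell_eq_getElem _ _ _ h1 h2]
  by_cases hc : j < cols
  · simp only [stepA_getElem cols g i hi, List.getElem_mapIdx, if_pos hc]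
  · simp only [stepA_getElem cols g i hi, List.getElem_mapIdx, if_neg hc]
    rw [pvCell_eq_getElem g i j hi hj']

theorem newA_dot (g : List (List String)) (i j : Nat) :
    (newA g i j == ".") = (pvCell g i j == ".") := by
  simp only [newA]
  by_cases hL : pvCell g i j = "L"
  · rw [hL]; by_cases h0 : (getAdj i j g).countP (fun a => pvCell g a.1 a.2 == "#") = 0 <;> simp [h0]
  · by_cases hH : pvCell g i j = "#"
    · rw [hH]
      by_cases h4 : 4 < (getAdj i j g).countP (fun a => pvCell g a.1 a.2 == "#") <;> simp [h4]
    · have hL' : (pvCell g i j == "L") = false := by simpa using hL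
      have hH' : (pvCell g i j == "#") = false := by simpa using hH
      simp [hL', hH']

theorem sh_stepA (l0 g : List (List String)) (hsh : pvSh l0 g) :
    pvSh l0 (stepA ((l0.getD 0 []).length) g) :=
  ⟨by rw [stepA_length, hsh.1], fun k => by rw [stepA_getD_len, hsh.2 k]⟩

theorem msk_stepA (l0 g : List (List String))
    (hpre : ∀ row ∈ l0, (l0.getD 0 []).length ≤ row.length)
    (hsh : pvSh l0 g) (hmask : pvMsk l0 g) :
    pvMsk l0 (stepA ((l0.getD 0 []).length) g) := by
  intro a b ha hb
  have ha' : a < g.length := by rw [hsh.1]; exact ha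
  have hrow : (l0.getD 0 []).length ≤ (l0.getD a []).length := by
    apply hpre
    rw [List.getD_eq_getElem _ _ ha]
    exact List.getElem_mem ha
  have hb' : b < (g.getD a []).length := by rw [hsh.2 a]; omega
  rw [pvCell_stepA _ g a b ha' hb', if_pos hb, newA_dot, hmask a b ha hb]

theorem stepB_eq (l0 g : List (List String))
    (hpre : ∀ row ∈ l0, (l0.getD 0 []).length ≤ row.length)
    (hsh : pvSh l0 g) (hmask : pvMsk l0 g) :
    stepB (tableB l0 l0.length ((l0.getD 0 []).length)) l0.length ((l0.getD 0 []).length)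
        (g.map (fun r => r.take ((l0.getD 0 []).length)))
      = (stepA ((l0.getD 0 []).length) g).map (fun r => r.take ((l0.getD 0 []).length)) := by
  apply List.ext_getElem
  · simp only [stepB, stepA, List.length_map, List.length_range, List.length_mapIdx]
    exact hsh.1.symm
  intro i h1 h2
  have hi : i < l0.length := by
    simpa only [stepB, List.length_map, List.length_range] using h1
  have hig : i < g.length := by rw [hsh.1]; exact hi
  have hrowlen : (l0.getD 0 []).length ≤ (g[i]).length := by
    rw [← List.getD_eq_getElem g [] hig, hsh.2 i]
    apply hpre
    rw [List.getD_eq_getElem _ _ hi]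
    exact List.getElem_mem hi
  apply List.ext_getElem
  · simp only [stepB, stepA, List.getElem_map, List.getElem_range, List.getElem_mapIdx,
      List.length_map, List.length_range, List.length_take, List.length_mapIdx]
    omega
  intro j hj1 hj2
  have hj : j < (l0.getD 0 []).length := by
    simpa only [stepB, List.getElem_map, List.getElem_range, List.length_map,
      List.length_range] using hj1
  have htbl : (((tableB l0 l0.length ((l0.getD 0 []).length)).getD i []).getD j [])
      = visB l0 l0.length ((l0.getD 0 []).length) i j := by
    rw [tableB, getD_range_map _ _ _ _ hi, getD_range_map _ _ _ _ hj]
  have hadj : visB l0 l0.length ((l0.getD 0 []).length) i j = getAdj i j g :=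
    (getAdj_eq_visB l0 g i j hsh.1 (hsh.2 0) hmask hi hj).symm
  have hcount : (((tableB l0 l0.length ((l0.getD 0 []).length)).getD i []).getD j []).countP
        (fun p => pvCell (g.map (fun r => r.take ((l0.getD 0 []).length))) p.1 p.2 == "#")
      = (getAdj i j g).countP (fun a => pvCell g a.1 a.2 == "#") := by
    rw [htbl, hadj]
    apply countP_congr_mem
    intro p hp
    have hb := getAdj_mem_bounds l0 g i j hsh.1 (hsh.2 0) hmask hi hj p hp
    rw [pvCell_map_take g _ p.1 p.2 hb.2]
  have hcell : pvCell (g.map (fun r => r.take ((l0.getD 0 []).length))) i j = pvCell g i j :=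
    pvCell_map_take g _ i j hj
  simp only [stepB, stepA, List.getElem_map, List.getElem_range, List.getElem_take,
    List.getElem_mapIdx, if_pos hj, hcount, hcell, newA]

theorem stepA_trunc_inj (l0 g : List (List String))
    (h : (stepA ((l0.getD 0 []).length) g).map (fun r => r.take ((l0.getD 0 []).length))
          = g.map (fun r => r.take ((l0.getD 0 []).length))) :
    stepA ((l0.getD 0 []).length) g = g := by
  apply List.ext_getElem
  · exact stepA_length _ _
  intro i h1 h2
  apply List.ext_getElem
  · simp only [stepA, List.getElem_mapIdx, List.length_mapIdx]
  intro j hj1 hj2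
  have hrow : ((stepA ((l0.getD 0 []).length) g)[i]'h1).take ((l0.getD 0 []).length)
      = (g[i]'h2).take ((l0.getD 0 []).length) := by
    have hh := congrArg (fun L => L[i]?) h
    simp only [List.getElem?_map] at hh
    rw [List.getElem?_eq_getElem h1, List.getElem?_eq_getElem h2] at hh
    simpa using hh
  by_cases hj : j < (l0.getD 0 []).length
  · have hh := congrArg (fun r => r[j]?) hrow
    simp only [List.getElem?_take_of_lt hj] at hh
    rw [List.getElem?_eq_getElem hj1, List.getElem?_eq_getElem hj2] at hh
    simpa using hh
  · simp only [stepA, List.getElem_mapIdx, if_neg hj]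

theorem count_trunc (l0 g : List (List String))
    (hpre : ∀ row ∈ l0, (l0.getD 0 []).length ≤ row.length) (hsh : pvSh l0 g) :
    ((g.map (fun r => r.take ((l0.getD 0 []).length))).map (fun row => row.count "#")).sum
      = ((List.range l0.length).map (fun i => ((List.range ((l0.getD 0 []).length)).filter
          (fun j => pvCell g i j == "#")).length)).sum := by
  congr 1
  apply List.ext_getElem
  · simp [hsh.1]
  intro i h1 h2
  have hig : i < g.length := by simpa using h1
  have hi : i < l0.length := by rw [← hsh.1]; exact hig
  have hrowlen : (l0.getD 0 []).length ≤ (g[i]).length := by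
    rw [← List.getD_eq_getElem g [] hig, hsh.2 i]
    apply hpre
    rw [List.getD_eq_getElem _ _ hi]
    exact List.getElem_mem hi
  simp only [List.getElem_map, List.getElem_range]
  rw [List.count_eq_countP]
  have hrow : (g[i]).take ((l0.getD 0 []).length)
      = (List.range ((l0.getD 0 []).length)).map (fun j => pvCell g i j) := by
    apply List.ext_getElem
    · simp only [List.length_take, List.length_map, List.length_range]
      omega
    intro j hj1 hj2
    simp only [List.getElem_take, List.getElem_map, List.getElem_range]
    rw [pvCell_eq_getElem g i j hig (by simp only [List.length_take] at hj1; omega)]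
  rw [hrow, List.countP_map, List.countP_eq_length_filter]
  simp only [Function.comp_def]

theorem loop_main (l0 : List (List String))
    (hpre : l0 ≠ [] ∧ ∀ row ∈ l0, (l0.getD 0 []).length ≤ row.length) :
    ∀ (f : Nat) (g : List (List String)), pvSh l0 g → pvMsk l0 g →
      loopB (tableB l0 l0.length ((l0.getD 0 []).length)) l0.length ((l0.getD 0 []).length) f
          (g.map (fun r => r.take ((l0.getD 0 []).length)))
        = ((((List.range l0.length).map (fun i => ((List.range ((l0.getD 0 []).length)).filter
            (fun j => pvCell (loopA ((l0.getD 0 []).length) f g) i j == "#")).length)).sum : Nat) : Int) := by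
  intro f
  induction f with
  | zero =>
    intro g hsh hmask
    rw [loopB, loopA]
    exact congrArg Nat.cast (count_trunc l0 g hpre.2 hsh)
  | succ f ih =>
    intro g hsh hmask
    have hstep := stepB_eq l0 g hpre.2 hsh hmask
    rw [loopB, loopA]
    simp only [hstep]
    by_cases hfix : stepA ((l0.getD 0 []).length) g = g
    · have b1 : ((stepA ((l0.getD 0 []).length) g).map (fun r => r.take ((l0.getD 0 []).length))
          == g.map (fun r => r.take ((l0.getD 0 []).length))) = true := by
        rw [hfix]; exact beq_iff_eq.mpr rfl
      have b2 : (stepA ((l0.getD 0 []).length) g == g) = true := beq_iff_eq.mpr hfix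
      simp only [b1, b2, if_true]
      exact congrArg Nat.cast (count_trunc l0 g hpre.2 hsh)
    · have hne : ((stepA ((l0.getD 0 []).length) g).map (fun r => r.take ((l0.getD 0 []).length))
          == g.map (fun r => r.take ((l0.getD 0 []).length))) = false := by
        apply beq_eq_false_iff_ne.mpr
        exact fun h => hfix (stepA_trunc_inj l0 g h)
      have hne2 : (stepA ((l0.getD 0 []).length) g == g) = false :=
        beq_eq_false_iff_ne.mpr hfix
      simp only [hne, hne2]
      exact ih (stepA ((l0.getD 0 []).length) g) (sh_stepA l0 g hsh)
        (msk_stepA l0 g hpre.2 hsh hmask)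

theorem equilibrium2_main : ∀ (l : List (List String)), Pre_equilibrium2 l →
    equilibrium2 l = equilibrium2_alt l := by
  intro l hpre
  simp only [equilibrium2, equilibrium2_alt]
  exact (loop_main l hpre (2 ^ (l.length * (l.getD 0 []).length) + 1) l
    ⟨rfl, fun k => rfl⟩ (fun a b _ _ => rfl)).symm

-- ===== VERDICT (by name: the statement is the Claim_ definition above) =====
theorem equilibrium2_spec : Claim_equal_equilibrium2 := by
  intro l _ hpre
  exact equilibrium2_main l hpre
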